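-- pv_equiv track=rewrite | github.com/zeriouslyzen/icebrg | src/iceburg/emergence/breakthrough_storage.py | _determine_discovery_type
-- ===== SOURCE A (Python) =====
-- from typing import Any, Dict, List, Optional
--
-- def _determine_discovery_type(emergence_data: Dict[str, Any]) -> str:
--     """Determine the type of discovery based on emergence data."""
--     patterns = emergence_data.get("metadata", {}).get("patterns", [])
--
--     if any("quantum_terminology" in p for p in patterns):
--         return "quantum_breakthrough"
--     elif any("cross_domain_synthesis" in p for p in patterns):
--         return "cross_domain_synthesis"
--     elif any("novel_predictions" in p for p in patterns):
--         return "predictive_breakthrough"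
--     elif any("mathematical_rigor" in p for p in patterns):
--         return "mathematical_breakthrough"
--     else:
--         return "general_breakthrough"
-- ===== SOURCE B (Python) =====
-- def _determine_discovery_type(emergence_data):
--     """Determine the type of discovery based on emergence data."""
--     patterns = emergence_data.get("metadata", {}).get("patterns", [])
--     keywords = ["quantum_terminology", "cross_domain_synthesis",
--                 "novel_predictions", "mathematical_rigor"]
--     results = ["quantum_breakthrough", "cross_domain_synthesis",
--                "predictive_breakthrough", "mathematical_breakthrough",
--                "general_breakthrough"]
--     best = len(keywords)
--     for p in patterns:
--         for i, kw in enumerate(keywords):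
--             if kw in p:
--                 best = min(best, i)
--     return results[best]
-- ===== Notes on version B (the rewrite author's own statement) =====
-- stated objective: alternative
-- what changed: Replaces A's chain of up to four separate any()-scans over patterns with a single pass that maintains a running minimum priority rank over a keyword table, then indexes a parallel result list.
import Mathlib
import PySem

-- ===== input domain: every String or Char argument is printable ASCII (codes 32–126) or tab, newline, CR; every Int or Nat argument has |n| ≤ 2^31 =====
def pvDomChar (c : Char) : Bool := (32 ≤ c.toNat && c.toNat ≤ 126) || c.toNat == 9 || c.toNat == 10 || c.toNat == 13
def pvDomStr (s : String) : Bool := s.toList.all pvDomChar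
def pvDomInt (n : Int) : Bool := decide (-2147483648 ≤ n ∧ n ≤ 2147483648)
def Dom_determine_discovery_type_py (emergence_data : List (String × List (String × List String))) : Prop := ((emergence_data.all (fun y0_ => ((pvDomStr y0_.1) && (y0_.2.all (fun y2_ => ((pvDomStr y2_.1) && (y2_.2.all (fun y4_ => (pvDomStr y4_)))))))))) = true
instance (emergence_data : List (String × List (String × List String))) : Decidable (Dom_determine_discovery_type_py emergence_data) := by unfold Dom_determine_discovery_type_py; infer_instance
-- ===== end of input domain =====

-- B replaces A's chain of up to four separate any()-scans over the pattern list with one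
-- pass maintaining a running minimum priority rank over a keyword table (alternative decomposition).


-- ===== PORT A =====
def determine_discovery_type_py (emergence_data : List (String × List (String × List String))) : String :=
  let metadata := (PySem.Dict.mk emergence_data).getD "metadata" []
  let patterns := (PySem.Dict.mk metadata).getD "patterns" []
  if patterns.any (fun p => PySem.Str.isIn "quantum_terminology" p) then "quantum_breakthrough"
  else if patterns.any (fun p => PySem.Str.isIn "cross_domain_synthesis" p) then "cross_domain_synthesis"
  else if patterns.any (fun p => PySem.Str.isIn "novel_predictions" p) then "predictive_breakthrough"
  else if patterns.any (fun p => PySem.Str.isIn "mathematical_rigor" p) then "mathematical_breakthrough"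
  else "general_breakthrough"

-- ===== PORT B =====
def pvKeywords : List String :=
  ["quantum_terminology", "cross_domain_synthesis", "novel_predictions", "mathematical_rigor"]
def pvResults : List String :=
  ["quantum_breakthrough", "cross_domain_synthesis", "predictive_breakthrough",
   "mathematical_breakthrough", "general_breakthrough"]

def determine_discovery_type_py_alt (emergence_data : List (String × List (String × List String))) : String :=
  let metadata := (PySem.Dict.mk emergence_data).getD "metadata" []
  let patterns := (PySem.Dict.mk metadata).getD "patterns" []
  let best : Int := patterns.foldl (fun b p =>
    (PySem.List.enumerate pvKeywords).foldl
      (fun b ik => if PySem.Str.isIn ik.2 p then min b ik.1 else b) b) 4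
  (PySem.List.pyGet? pvResults best).getD ""

-- ===== PRECONDITION & SPEC =====
def Spec_determine_discovery_type_py (emergence_data : List (String × List (String × List String))) (out : String) : Prop := out = determine_discovery_type_py_alt emergence_data
instance (emergence_data : List (String × List (String × List String))) (out : String) : Decidable (Spec_determine_discovery_type_py emergence_data out) := by unfold Spec_determine_discovery_type_py; infer_instance

-- ===== CLAIM (what is proved, stated in full; the proofs are below) =====
def Claim_equal_determine_discovery_type_py : Prop := ∀ (emergence_data : List (String × List (String × List String))), Dom_determine_discovery_type_py emergence_data → Spec_determine_discovery_type_py emergence_data (determine_discovery_type_py emergence_data)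

-- ===== LEMMAS AND PROOFS =====

-- per-pattern rank: index of the first keyword contained in p (4 if none)
def pvRank1 (p : String) : Int :=
  if PySem.Str.isIn "quantum_terminology" p then 0
  else if PySem.Str.isIn "cross_domain_synthesis" p then 1
  else if PySem.Str.isIn "novel_predictions" p then 2
  else if PySem.Str.isIn "mathematical_rigor" p then 3
  else 4

theorem pvEnum_eval : PySem.List.enumerate pvKeywords =
    [(0, "quantum_terminology"), (1, "cross_domain_synthesis"),
     (2, "novel_predictions"), (3, "mathematical_rigor")] := by rfl

-- the inner keyword loop computes a running minimum with the first-match rank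
theorem pvInner_eq (p : String) (b : Int) (hb : b ≤ 4) :
    (PySem.List.enumerate pvKeywords).foldl
      (fun b ik => if PySem.Str.isIn ik.2 p then min b ik.1 else b) b = min b (pvRank1 p) := by
  rw [pvEnum_eval]
  unfold pvRank1
  by_cases h0 : PySem.Str.isIn "quantum_terminology" p = true <;>
  by_cases h1 : PySem.Str.isIn "cross_domain_synthesis" p = true <;>
  by_cases h2 : PySem.Str.isIn "novel_predictions" p = true <;>
  by_cases h3 : PySem.Str.isIn "mathematical_rigor" p = true <;>
    simp only [List.foldl_cons, List.foldl_nil, h0, h1, h2, h3, if_true] <;> simp <;> omega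

def pvBest (patterns : List String) : Int :=
  patterns.foldl (fun b p => min b (pvRank1 p)) 4

theorem pvFoldl_min (l : List String) (b c : Int) :
    l.foldl (fun b p => min b (pvRank1 p)) (min b c)
      = min b (l.foldl (fun b p => min b (pvRank1 p)) c) := by
  induction l generalizing b c with
  | nil => rfl
  | cons x xs ih =>
      simp only [List.foldl_cons]
      rw [min_assoc, ih]

theorem pvBest_cons (p : String) (ps : List String) :
    pvBest (p :: ps) = min (pvRank1 p) (pvBest ps) := by
  have h : min (4 : Int) (pvRank1 p) = min (pvRank1 p) 4 := min_comm _ _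
  simp only [pvBest, List.foldl_cons, h, pvFoldl_min]

-- the running minimum decides exactly A's chain of any-tests
theorem pvBest_char (patterns : List String) :
    pvBest patterns =
      (if patterns.any (fun p => PySem.Str.isIn "quantum_terminology" p) then 0
       else if patterns.any (fun p => PySem.Str.isIn "cross_domain_synthesis" p) then 1
       else if patterns.any (fun p => PySem.Str.isIn "novel_predictions" p) then 2
       else if patterns.any (fun p => PySem.Str.isIn "mathematical_rigor" p) then 3
       else 4) := by
  induction patterns with
  | nil => rfl
  | cons p ps ih =>
      rw [pvBest_cons, ih]
      unfold pvRank1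
      simp only [List.any_cons]
      by_cases h0 : PySem.Str.isIn "quantum_terminology" p = true <;>
      by_cases h1 : PySem.Str.isIn "cross_domain_synthesis" p = true <;>
      by_cases h2 : PySem.Str.isIn "novel_predictions" p = true <;>
      by_cases h3 : PySem.Str.isIn "mathematical_rigor" p = true <;>
        simp only [h0, h1, h2, h3, Bool.true_or, Bool.false_or, if_true] <;>
        simp <;> split_ifs <;> omega

-- ===== VERDICT (by name: the statement is the Claim_ definition above) =====
theorem determine_discovery_type_py_spec : Claim_equal_determine_discovery_type_py := by
  intro ed _
  unfold Spec_determine_discovery_type_py determine_discovery_type_py determine_discovery_type_py_alt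
  dsimp only
  have hfold : ∀ (l : List String) (b : Int), b ≤ 4 →
      l.foldl (fun b p =>
        (PySem.List.enumerate pvKeywords).foldl
          (fun b ik => if PySem.Str.isIn ik.2 p then min b ik.1 else b) b) b
      = l.foldl (fun b p => min b (pvRank1 p)) b := by
    intro l
    induction l with
    | nil => intro b _; rfl
    | cons x xs ih =>
        intro b hb
        simp only [List.foldl_cons, pvInner_eq x b hb]
        exact ih _ (le_trans (min_le_left _ _) hb)
  rw [hfold _ 4 le_rfl]
  rw [show ∀ l : List String, l.foldl (fun b p => min b (pvRank1 p)) 4 = pvBest l from fun _ => rfl]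
  rw [pvBest_char]
  cases h0 : List.any ((PySem.Dict.mk ((PySem.Dict.mk ed).getD "metadata" [])).getD "patterns" []) (fun p => PySem.Str.isIn "quantum_terminology" p) <;>
  cases h1 : List.any ((PySem.Dict.mk ((PySem.Dict.mk ed).getD "metadata" [])).getD "patterns" []) (fun p => PySem.Str.isIn "cross_domain_synthesis" p) <;>
  cases h2 : List.any ((PySem.Dict.mk ((PySem.Dict.mk ed).getD "metadata" [])).getD "patterns" []) (fun p => PySem.Str.isIn "novel_predictions" p) <;>
  cases h3 : List.any ((PySem.Dict.mk ((PySem.Dict.mk ed).getD "metadata" [])).getD "patterns" []) (fun p => PySem.Str.isIn "mathematical_rigor" p) <;>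
    simp only [h0, h1, h2, h3, reduceIte, if_true, if_false, Bool.false_eq_true] <;> rfl
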